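-- pv_equiv track=rewrite | github.com/kzqq092-png/houta | core/data_quality_risk_manager.py | _count_consecutive_failures
-- ===== SOURCE A (Python) =====
-- from typing import Dict, List, Any, Optional, Tuple, Callable
--
-- def _count_consecutive_failures(source_history: List[Dict]) -> int:
--     """计算连续失败次数"""
--     consecutive_count = 0
--
--     for record in reversed(source_history):
--         if record.get("risk_level") in ["high", "critical"]:
--             consecutive_count += 1
--         else:
--             break
--
--     return consecutive_count
-- ===== SOURCE B (Python) =====
-- from typing import Dict, List
--
-- def _count_consecutive_failures(source_history: List[Dict]) -> int:
--     """Forward pass: increment on failing record, reset to 0 otherwise."""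
--     consecutive_count = 0
--     for record in source_history:
--         if record.get("risk_level") in ["high", "critical"]:
--             consecutive_count += 1
--         else:
--             consecutive_count = 0
--     return consecutive_count
-- ===== Notes on version B (the rewrite author's own statement) =====
-- stated objective: alternative
-- what changed: Replaced the backward scan with early break by a single forward pass that increments a counter on failing records and resets it to 0 otherwise; the final counter is the trailing run length.
import Mathlib
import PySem

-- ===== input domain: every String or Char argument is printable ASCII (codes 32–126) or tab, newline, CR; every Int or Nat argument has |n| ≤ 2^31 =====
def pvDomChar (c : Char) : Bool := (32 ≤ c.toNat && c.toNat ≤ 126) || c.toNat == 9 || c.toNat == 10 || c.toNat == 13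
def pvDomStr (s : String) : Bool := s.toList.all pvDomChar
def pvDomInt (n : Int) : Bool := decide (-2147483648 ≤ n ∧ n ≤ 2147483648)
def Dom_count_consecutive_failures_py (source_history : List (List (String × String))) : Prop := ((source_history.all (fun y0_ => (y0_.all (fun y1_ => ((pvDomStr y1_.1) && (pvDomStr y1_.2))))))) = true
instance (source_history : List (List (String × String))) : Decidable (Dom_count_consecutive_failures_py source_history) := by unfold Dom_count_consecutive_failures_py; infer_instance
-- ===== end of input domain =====

-- B replaces A's backward scan with early break by a forward pass with reset-to-0 accumulator; same O(n) cost, different decomposition.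

-- ===== PORT A =====
-- record.get("risk_level") in ["high", "critical"]  (assoc-list lookup = first match; None is not in the list)
def pvIsFailure (record : List (String × String)) : Bool :=
  match record.lookup "risk_level" with
  | some v => v == "high" || v == "critical"
  | none => false

-- the for-loop over reversed(source_history) with break: recursion over the reversed list carrying consecutive_count
def pvLoopA (consecutive_count : Int) (rs : List (List (String × String))) : Int :=
  match rs with
  | [] => consecutive_count
  | record :: rest =>
      if pvIsFailure record then pvLoopA (consecutive_count + 1) rest
      else consecutive_count

def count_consecutive_failures_py (source_history : List (List (String × String))) : Int :=
  pvLoopA 0 source_history.reverse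

-- ===== PORT B =====
def count_consecutive_failures_py_alt (source_history : List (List (String × String))) : Int :=
  source_history.foldl (fun consecutive_count record =>
    if pvIsFailure record then consecutive_count + 1 else 0) 0

-- ===== PRECONDITION & SPEC =====
def Spec_count_consecutive_failures_py (source_history : List (List (String × String))) (out : Int) : Prop := out = count_consecutive_failures_py_alt source_history
instance (source_history : List (List (String × String))) (out : Int) : Decidable (Spec_count_consecutive_failures_py source_history out) := by unfold Spec_count_consecutive_failures_py; infer_instance

-- ===== CLAIM (what is proved, stated in full; the proofs are below) =====
def Claim_equal_count_consecutive_failures_py : Prop := ∀ (source_history : List (List (String × String))), Dom_count_consecutive_failures_py source_history → Spec_count_consecutive_failures_py source_history (count_consecutive_failures_py source_history)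

-- ===== LEMMAS AND PROOFS =====

-- A's loop with accumulator acc equals acc plus the loop started at 0
theorem pvLoopA_acc (rs : List (List (String × String))) : ∀ acc : Int, pvLoopA acc rs = acc + pvLoopA 0 rs := by
  induction rs with
  | nil => intro acc; simp [pvLoopA]
  | cons r rest ih =>
      intro acc
      by_cases h : pvIsFailure r
      · simp [pvLoopA, h, ih (acc + 1), ih 1]; ring
      · simp [pvLoopA, h]

-- main bridge: the backward scan of l equals the forward fold over l
theorem pvLoopA_reverse_eq_foldl (l : List (List (String × String))) :
    pvLoopA 0 l.reverse =
      l.foldl (fun c r => if pvIsFailure r then c + 1 else 0) 0 := by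
  induction l using List.reverseRecOn with
  | nil => simp [pvLoopA]
  | append_singleton l r ih =>
      rw [List.reverse_append, List.reverse_singleton, List.singleton_append,
          List.foldl_append, List.foldl_cons, List.foldl_nil]
      by_cases h : pvIsFailure r
      · show pvLoopA 0 (r :: l.reverse) = _
        rw [pvLoopA, if_pos h, pvLoopA_acc, ih, if_pos h]
        omega
      · show pvLoopA 0 (r :: l.reverse) = _
        rw [pvLoopA, if_neg h, if_neg h]

-- ===== VERDICT (by name: the statement is the Claim_ definition above) =====
theorem count_consecutive_failures_py_spec : Claim_equal_count_consecutive_failures_py := by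
  intro l _
  unfold Spec_count_consecutive_failures_py count_consecutive_failures_py count_consecutive_failures_py_alt
  exact pvLoopA_reverse_eq_foldl l
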